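-- pv_equiv track=rewrite | github.com/yeseul0722/Algorithm | 프로그래머스/1/140108. 문자열 나누기/문자열 나누기.py | solution
-- ===== SOURCE A (Python) =====
-- def solution(s):
--     answer = 0
--     x = ''
--     cnt1, cnt2 = 0, 0
--     for i in s:
--         if cnt1 == cnt2:
--             answer += 1
--             x = i
--             cnt1, cnt2 = 0, 0
--         if i == x:
--             cnt1 += 1
--         else:
--             cnt2 += 1
--
--     return answer
-- ===== SOURCE B (Python) =====
-- def solution(s):
--     answer = 0
--     while s:
--         first = s[0]
--         cut = len(s)
--         for k in range(2, len(s) + 1, 2):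
--             if 2 * s[:k].count(first) == k:
--                 cut = k
--                 break
--         s = s[cut:]
--         answer += 1
--     return answer
-- ===== Notes on version B (the rewrite author's own statement) =====
-- stated objective: alternative
-- what changed: Replaces A's single fold with running counters (answer, current char, cnt1, cnt2) by brute-force segment cutting: each cut point is found by re-counting the first character in whole even-length prefixes (str.count on slices) instead of maintaining incremental counters, then the consumed prefix is sliced off; O(n^2) worst case vs A's O(n).
import Mathlib
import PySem

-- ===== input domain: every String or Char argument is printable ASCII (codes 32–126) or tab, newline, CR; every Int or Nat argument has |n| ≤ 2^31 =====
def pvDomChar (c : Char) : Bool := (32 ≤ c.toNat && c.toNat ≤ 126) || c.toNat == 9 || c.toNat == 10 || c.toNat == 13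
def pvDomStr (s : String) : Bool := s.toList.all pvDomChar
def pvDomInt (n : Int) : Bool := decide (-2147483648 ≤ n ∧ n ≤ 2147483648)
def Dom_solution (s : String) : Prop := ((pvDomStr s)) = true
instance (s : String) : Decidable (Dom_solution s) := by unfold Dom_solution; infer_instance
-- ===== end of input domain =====

-- B replaces A's incremental counters by brute-force prefix re-counting per segment (O(n^2) vs O(n)): alternative, not faster.

-- ===== PORT A =====
-- A's loop state: (answer, x, cnt1, cnt2); x starts as '' (never equal to a char) — modelled as Option Char, none initially.
def solutionStep (st : Int × Option Char × Int × Int) (i : Char) : Int × Option Char × Int × Int :=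
  let (answer, x, cnt1, cnt2) := st
  let (answer, x, cnt1, cnt2) :=
    if cnt1 == cnt2 then (answer + 1, some i, (0 : Int), (0 : Int)) else (answer, x, cnt1, cnt2)
  if some i == x then (answer, x, cnt1 + 1, cnt2) else (answer, x, cnt1, cnt2 + 1)

def solution (s : String) : Int :=
  (s.toList.foldl solutionStep (0, none, 0, 0)).1

-- ===== PORT B =====
-- Source B's inner `for k in range(2, len(s)+1, 2)` loop over the explicit list of candidate
-- even prefix lengths: first k with 2 * s[:k].count(first) == k, else the fallback cut = len(s)
def solutionScan (l : List Char) (first : Char) : List Nat → Nat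
  | [] => l.length
  | k :: ks => if 2 * ((l.take k).count first) == k then k else solutionScan l first ks

-- Source B's outer `while s:` loop, one segment cut per iteration; the fuel (initial length)
-- only makes the recursion structural — it never runs out, each iteration consumes ≥ 1 char
def solutionAltGo : Nat → List Char → Int
  | _, [] => 0
  | 0, _ :: _ => 0
  | fuel + 1, c :: rest =>
    1 + solutionAltGo fuel
      ((c :: rest).drop (solutionScan (c :: rest) c (List.range' 2 ((c :: rest).length / 2) 2)))

def solution_alt (s : String) : Int := solutionAltGo s.toList.length s.toList

-- ===== PRECONDITION & SPEC =====
def Spec_solution (s : String) (out : Int) : Prop := out = solution_alt s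
instance (s : String) (out : Int) : Decidable (Spec_solution s out) := by unfold Spec_solution; infer_instance

-- ===== CLAIM (what is proved, stated in full; the proofs are below) =====
def Claim_equal_solution : Prop := ∀ (s : String), Dom_solution s → Spec_solution s (solution s)

-- ===== LEMMAS AND PROOFS =====

-- Proof-side bridge: A's consumption of one segment, as an explicit consumer with the two counters
-- (this is an abstraction of A's fold, not either port).
def solutionInner (first : Char) (same diff : Int) : List Char → List Char
  | [] => []
  | c :: rest =>
    if c == first then
      if same + 1 == diff then rest else solutionInner first (same + 1) diff rest
    else
      if same == diff + 1 then rest else solutionInner first same (diff + 1) rest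

lemma solutionInner_length (first : Char) (same diff : Int) (l : List Char) :
    (solutionInner first same diff l).length ≤ l.length := by
  induction l generalizing same diff with
  | nil => simp [solutionInner]
  | cons c rest ih =>
    simp only [solutionInner]
    split_ifs <;> simp only [List.length_cons] <;>
      first
        | omega
        | exact le_trans (ih _ _) (Nat.le_succ _)

-- segment-by-segment count via solutionInner
def solutionOuter : List Char → Int
  | [] => 0
  | c :: rest => 1 + solutionOuter (solutionInner c 0 0 (c :: rest))
termination_by l => l.length
decreasing_by
  simp only [solutionInner]
  have h1 := solutionInner_length c (0 + 1) 0 rest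
  have h2 := solutionInner_length c 0 (0 + 1) rest
  simp only [List.length_cons]
  split_ifs <;> omega

-- Joint invariant, by strong induction on length:
-- (1) from an unbalanced state with remembered char f, A's fold equals ans + solutionOuter of the remainder after the inner consumer;
-- (2) from a balanced state, A's fold equals ans + solutionOuter of the whole remainder.
lemma solution_key : ∀ (n : Nat) (l : List Char), l.length ≤ n →
    ((∀ (ans : Int) (f : Char) (c1 c2 : Int), c1 ≠ c2 →
        (List.foldl solutionStep (ans, some f, c1, c2) l).1
          = ans + solutionOuter (solutionInner f c1 c2 l))
     ∧ (∀ (ans : Int) (x : Option Char) (c : Int),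
        (List.foldl solutionStep (ans, x, c, c) l).1 = ans + solutionOuter l)) := by
  intro n
  induction n with
  | zero =>
    intro l hl
    have : l = [] := List.eq_nil_of_length_eq_zero (Nat.le_zero.mp hl)
    subst this
    constructor
    · intro ans f c1 c2 _; simp [solutionInner, solutionOuter]
    · intro ans x c; simp [solutionOuter]
  | succ n ih =>
    intro l hl
    cases l with
    | nil =>
      constructor
      · intro ans f c1 c2 _; simp [solutionInner, solutionOuter]
      · intro ans x c; simp [solutionOuter]
    | cons i rest =>
      have hrest : rest.length ≤ n := by simpa using Nat.succ_le_succ_iff.mp hl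
      constructor
      · intro ans f c1 c2 hne
        have hbeq : (c1 == c2) = false := by simpa using hne
        by_cases hif : i == f
        · simp only [List.foldl_cons, solutionStep, hbeq, Bool.false_eq_true, if_false,
            solutionInner, hif, if_true]
          have hx : (some i == some f) = true := by simpa using hif
          rw [hx]
          simp only [if_true]
          by_cases hbal : c1 + 1 = c2
          · have : (c1 + 1 == c2) = true := by simpa using hbal
            rw [this]; simp only [if_true]
            rw [← hbal]
            exact (ih rest hrest).2 ans (some f) (c1 + 1)
          · have : (c1 + 1 == c2) = false := by simpa using hbal
            rw [this]; simp only [Bool.false_eq_true, if_false]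
            exact (ih rest hrest).1 ans f (c1 + 1) c2 hbal
        · have hif' : (i == f) = false := by simpa using hif
          simp only [List.foldl_cons, solutionStep, hbeq, Bool.false_eq_true, if_false,
            solutionInner, hif']
          have hx : (some i == some f) = false := by simpa using hif
          rw [hx]
          simp only [Bool.false_eq_true, if_false]
          by_cases hbal : c1 = c2 + 1
          · have : (c1 == c2 + 1) = true := by simpa using hbal
            rw [this]; simp only [if_true]
            rw [hbal]
            exact (ih rest hrest).2 ans (some f) (c2 + 1)
          · have : (c1 == c2 + 1) = false := by simpa using hbal
            rw [this]; simp only [Bool.false_eq_true, if_false]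
            exact (ih rest hrest).1 ans f c1 (c2 + 1) hbal
      · intro ans x c
        simp only [List.foldl_cons, solutionStep, beq_self_eq_true, if_true, zero_add]
        have h1 : ((1 : Int) ≠ 0) := one_ne_zero
        rw [(ih rest hrest).1 (ans + 1) i 1 0 h1]
        have houter : solutionOuter (i :: rest)
            = 1 + solutionOuter (solutionInner i 1 0 rest) := by
          rw [solutionOuter]
          congr 1
          simp [solutionInner]
        rw [houter]; ring

-- signed balance of the j-th prefix of l w.r.t. char f
def solBal (l : List Char) (f : Char) (j : Nat) : Int :=
  2 * (((l.take j).count f : Int)) - (j : Int)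

lemma solBal_zero (l : List Char) (f : Char) : solBal l f 0 = 0 := by simp [solBal]

lemma solBal_succ (c : Char) (rest : List Char) (f : Char) (j : Nat) :
    solBal (c :: rest) f (j + 1) = (if c == f then 1 else -1) + solBal rest f j := by
  simp only [solBal, List.take_succ_cons, List.count_cons]
  by_cases h : c == f
  · have : (c = f) := by simpa using h
    simp [h, this]; push_cast; ring
  · have : ¬ (c = f) := by simpa using h
    simp [h, this]; push_cast; ring

-- if the balance is zero at j then j is even (balance = 2·count − j)
lemma solBal_even (l : List Char) (f : Char) (j : Nat) (h : solBal l f j = 0) : j % 2 = 0 := by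
  simp only [solBal] at h
  omega

-- first 1-based index where b + running balance hits 0, else the length
def firstZero (f : Char) : List Char → Int → Nat
  | [], _ => 0
  | c :: rest, b =>
    if (if c == f then b + 1 else b - 1) = 0 then 1
    else 1 + firstZero f rest (if c == f then b + 1 else b - 1)

-- the inner consumer drops exactly firstZero characters
lemma solutionInner_drop (f : Char) (l : List Char) :
    ∀ (c1 c2 : Int), solutionInner f c1 c2 l = l.drop (firstZero f l (c1 - c2)) := by
  induction l with
  | nil => intro c1 c2; simp [solutionInner, firstZero]
  | cons c rest ih =>
    intro c1 c2
    simp only [solutionInner, firstZero]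
    by_cases h : c == f
    · simp only [h, if_true]
      by_cases hb : c1 + 1 = c2
      · have h1 : (c1 + 1 == c2) = true := by simpa using hb
        have h2 : c1 - c2 + 1 = 0 := by omega
        rw [h1]; simp [h2]
      · have h1 : (c1 + 1 == c2) = false := by simpa using hb
        have h2 : ¬ (c1 - c2 + 1 = 0) := by omega
        rw [h1]; simp only [Bool.false_eq_true, if_false, h2]
        rw [ih (c1 + 1) c2]
        have : c1 + 1 - c2 = c1 - c2 + 1 := by ring
        rw [this, Nat.add_comm, List.drop_succ_cons]
    · simp only [h, Bool.false_eq_true, if_false]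
      by_cases hb : c1 = c2 + 1
      · have h1 : (c1 == c2 + 1) = true := by simpa using hb
        have h2 : c1 - c2 - 1 = 0 := by omega
        rw [h1]; simp [h2]
      · have h1 : (c1 == c2 + 1) = false := by simpa using hb
        have h2 : ¬ (c1 - c2 - 1 = 0) := by omega
        rw [h1]; simp only [Bool.false_eq_true, if_false, h2]
        rw [ih c1 (c2 + 1)]
        have : c1 - (c2 + 1) = c1 - c2 - 1 := by ring
        rw [this, Nat.add_comm, List.drop_succ_cons]

-- characterisation of firstZero in terms of prefix balances
lemma firstZero_spec (f : Char) : ∀ (l : List Char) (b : Int),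
    firstZero f l b ≤ l.length ∧
    (∀ j : Nat, 1 ≤ j → j < firstZero f l b → b + solBal l f j ≠ 0) ∧
    (firstZero f l b = l.length ∨ b + solBal l f (firstZero f l b) = 0) := by
  intro l
  induction l with
  | nil => intro b; exact ⟨by simp [firstZero], by simp [firstZero], by simp [firstZero]⟩
  | cons c rest ih =>
    intro b
    have hb1 : firstZero f (c :: rest) b
        = if (if c == f then b + 1 else b - 1) = 0 then 1
          else 1 + firstZero f rest (if c == f then b + 1 else b - 1) := by
      rw [firstZero]
    set b' := (if c == f then b + 1 else b - 1) with hb'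
    have hstep : ∀ j : Nat, b + solBal (c :: rest) f (j + 1) = b' + solBal rest f j := by
      intro j
      rw [solBal_succ, hb']
      by_cases h : c == f <;> simp [h] <;> ring
    by_cases h0 : b' = 0
    · have hfz : firstZero f (c :: rest) b = 1 := by rw [hb1, if_pos h0]
      refine ⟨by simp [hfz], ?_, ?_⟩
      · intro j h1 h2; omega
      · right
        rw [hfz]
        have h01 := hstep 0
        rw [solBal_zero] at h01
        simp only [Nat.zero_add] at h01
        omega
    · obtain ⟨ihlen, ihmin, ihend⟩ := ih b'
      have hfz : firstZero f (c :: rest) b = 1 + firstZero f rest b' := by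
        rw [hb1, if_neg h0]
      refine ⟨?_, ?_, ?_⟩
      · rw [hfz]; simp only [List.length_cons]; omega
      · intro j h1 h2
        rw [hfz] at h2
        rcases Nat.exists_eq_add_of_le h1 with ⟨j', rfl⟩
        rw [Nat.add_comm 1 j', hstep j']
        rcases Nat.eq_zero_or_pos j' with hz | hp
        · subst hz; rw [solBal_zero]; omega
        · exact ihmin j' hp (by omega)
      · rcases ihend with hlen | hzero
        · left; rw [hfz, hlen]; simp only [List.length_cons]; omega
        · right; rw [hfz, Nat.add_comm 1 _, hstep]; exact hzero

lemma firstZero_pos (f : Char) (c : Char) (rest : List Char) (b : Int) :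
    1 ≤ firstZero f (c :: rest) b := by
  rw [firstZero]; split <;> split <;> omega

lemma scan_eq_firstZero (f : Char) (l : List Char) :
    ∀ (m k : Nat), 2 ≤ k → k % 2 = 0 → k + 2 * m = 2 * ((l.length + 2) / 2) →
    (∀ j : Nat, 1 ≤ j → j < k → solBal l f j ≠ 0) →
    solutionScan l f (List.range' k m 2) = firstZero f l 0 := by
  obtain ⟨hlen, hmin, hend⟩ := firstZero_spec f l 0
  simp only [zero_add] at hmin hend
  intro m
  induction m with
  | zero =>
    intro k h2 heven hinv hall
    simp only [List.range'_zero, solutionScan]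
    have hkn : l.length < k := by omega
    rcases hend with hl | hz
    · omega
    · rcases Nat.eq_zero_or_pos (firstZero f l 0) with hz0 | hp
      · cases l with
        | nil => simp [hz0]
        | cons c rest => have := firstZero_pos f c rest 0; omega
      · exact absurd hz (hall _ hp (by omega))
  | succ m ih =>
    intro k h2 heven hinv hall
    have hkn : k ≤ l.length := by omega
    rw [List.range'_succ, solutionScan]
    by_cases hhit : 2 * ((l.take k).count f) == k
    · rw [if_pos hhit]
      have hcnt : 2 * ((l.take k).count f) = k := by simpa using hhit
      have hbal : solBal l f k = 0 := by simp only [solBal]; omega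
      have hge : k ≤ firstZero f l 0 := by
        by_contra h
        push_neg at h
        rcases Nat.eq_zero_or_pos (firstZero f l 0) with hz0 | hp
        · cases l with
          | nil => simp at hkn; omega
          | cons c rest => have := firstZero_pos f c rest 0; omega
        · rcases hend with hl | hz
          · omega
          · exact hall _ hp h hz
      have hle : firstZero f l 0 ≤ k := by
        by_contra h
        push_neg at h
        exact hmin k (by omega) h hbal
      omega
    · rw [if_neg hhit]
      apply ih (k + 2) (by omega) (by omega) (by omega)
      intro j h1 hj
      by_cases hjk : j < k
      · exact hall j h1 hjk
      · intro hz
        have heq : j = k ∨ j = k + 1 := by omega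
        rcases heq with rfl | rfl
        · have : 2 * ((l.take j).count f) = j := by simp only [solBal] at hz; omega
          exact hhit (by simpa using this)
        · have := solBal_even l f (k + 1) hz
          omega

-- hence segment consumption agrees: B's drop-by-scan = A's inner consumer
lemma drop_scan_eq_inner (c : Char) (rest : List Char) :
    (c :: rest).drop (solutionScan (c :: rest) c (List.range' 2 ((c :: rest).length / 2) 2))
      = solutionInner c 0 0 (c :: rest) := by
  rw [solutionInner_drop c (c :: rest) 0 0]
  have h01 : (0 : Int) - 0 = 0 := by ring
  rw [h01]
  congr 1
  apply scan_eq_firstZero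
  · omega
  · omega
  · omega
  · intro j h1 hj
    have hj1 : j = 1 := by omega
    subst hj1
    intro hz
    have := solBal_even (c :: rest) c 1 hz
    omega

lemma outer_eq_altGo : ∀ (fuel : Nat) (l : List Char), l.length ≤ fuel →
    solutionOuter l = solutionAltGo fuel l := by
  intro fuel
  induction fuel with
  | zero =>
    intro l hl
    have : l = [] := List.eq_nil_of_length_eq_zero (Nat.le_zero.mp hl)
    subst this; simp [solutionOuter, solutionAltGo]
  | succ fuel ih =>
    intro l hl
    cases l with
    | nil => simp [solutionOuter, solutionAltGo]
    | cons c rest =>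
      rw [solutionOuter, solutionAltGo, drop_scan_eq_inner]
      congr 1
      apply ih
      have : (solutionInner c 0 0 (c :: rest)).length < (c :: rest).length := by
        simp only [solutionInner]
        have h1 := solutionInner_length c (0 + 1) 0 rest
        have h2 := solutionInner_length c 0 (0 + 1) rest
        simp only [List.length_cons]
        split_ifs <;> omega
      simp only [List.length_cons] at hl this
      omega

-- ===== VERDICT (by name: the statement is the Claim_ definition above) =====
theorem solution_spec : Claim_equal_solution := by
  intro s _
  unfold Spec_solution solution solution_alt
  have h1 := (solution_key s.toList.length s.toList le_rfl).2 0 none 0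
  rw [h1, outer_eq_altGo s.toList.length s.toList le_rfl]
  ring
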